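-- pv_equiv track=rewrite | github.com/C7C4FF/PS | Programmers/77885.py | solution
-- ===== SOURCE A (Python) =====
-- def solution(numbers):
--     answer = []
--     cnt = 0
--
--     for number in numbers:
--         if number % 2 == 0:
--             answer.append(number+1)
--         else:
--             binary_number = format(number, 'b')
--             temp = 0
--             find_zero = binary_number.rfind('0')
--
--             if find_zero != -1:
--                 temp = int('0b1' + '0' * (len(binary_number) - find_zero - 1), 2)
--
--             else:
--                 temp = number + 1
--
--             answer.append(number + temp - temp // 2)
--
--     return answer
-- ===== SOURCE B (Python) =====
-- def solution(numbers):
--     answer = []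
--     for n in numbers:
--         if n % 2 == 0:
--             answer.append(n + 1)
--             continue
--         # count the trailing 1-bits of the magnitude (Python's binary
--         # notation is sign-magnitude), halving instead of building a string
--         t = 0
--         m = abs(n)
--         while m % 2 == 1:
--             t += 1
--             m //= 2
--         if m == 0:
--             # the magnitude is all ones in binary: no zero bit to promote
--             answer.append(n + (n + 1) // 2)
--         else:
--             answer.append(n + 2 ** (t - 1))
--     return answer
-- ===== Notes on version B (the rewrite author's own statement) =====
-- stated objective: simpler
-- what changed: Replaces the binary-string formatting, rfind('0') scan and int('0b...',2) re-parsing by pure arithmetic: count the trailing 1-bits of the magnitude by halving, then add 2**(t-1), with n+(n+1)//2 when the magnitude is all ones (A's find_zero == -1 branch).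
import Mathlib
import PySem

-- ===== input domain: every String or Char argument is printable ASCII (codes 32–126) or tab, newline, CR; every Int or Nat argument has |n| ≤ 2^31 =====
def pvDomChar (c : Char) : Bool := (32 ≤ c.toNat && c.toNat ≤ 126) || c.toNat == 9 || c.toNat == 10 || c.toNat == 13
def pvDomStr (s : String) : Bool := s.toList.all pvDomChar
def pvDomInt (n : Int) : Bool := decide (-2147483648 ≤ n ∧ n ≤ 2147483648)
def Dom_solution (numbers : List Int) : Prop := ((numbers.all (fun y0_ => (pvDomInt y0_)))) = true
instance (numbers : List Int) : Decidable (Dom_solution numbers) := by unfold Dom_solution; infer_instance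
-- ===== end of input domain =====

-- B replaces A's binary-string search (format / rfind('0') / int(...,2)) by an arithmetic
-- trailing-ones count on the magnitude: simpler, no string handling, same values everywhere.

-- ===== PORT A =====
-- hand port of format(m,'b') for a natural number: binary digits, MSB first ([] for 0); exact
def pvBits (m : Nat) : List Char :=
  if h : m = 0 then [] else pvBits (m / 2) ++ [if m % 2 == 1 then '1' else '0']
decreasing_by exact Nat.div_lt_self (Nat.pos_of_ne_zero h) (by omega)

-- hand port of format(number, 'b'): '-' then the binary magnitude for negatives, "0" for 0; exact
def pvFormatB (n : Int) : List Char :=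
  if n < 0 then '-' :: pvBits n.natAbs else if n = 0 then ['0'] else pvBits n.toNat

-- hand port of s.rfind('0'): highest index holding '0', -1 if absent; exact
def pvRfind0 : List Char → Int
  | [] => -1
  | c :: rest =>
      let r := pvRfind0 rest
      if r ≠ -1 then r + 1 else if c = '0' then 0 else -1

-- hand port of int('0b' + digits, 2) for digits over {'0','1'}: binary value of the digits; exact
def pvParseBin (l : List Char) : Int :=
  l.foldl (fun a c => 2 * a + (if c == '1' then 1 else 0)) 0

def pvElemA (number : Int) : Int :=
  if PySem.Int.mod number 2 == 0 then number + 1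
  else
    let binary_number := pvFormatB number
    let find_zero := pvRfind0 binary_number
    let temp : Int :=
      if find_zero ≠ -1 then
        pvParseBin ('1' :: List.replicate ((binary_number.length : Int) - find_zero - 1).toNat '0')
      else number + 1
    number + temp - PySem.Int.floordiv temp 2

def solution (numbers : List Int) : List Int :=
  numbers.foldl (fun answer number => answer ++ [pvElemA number]) []

-- ===== PORT B =====
-- the while loop of Source B, structural recursion on a fuel of |n| + 1 halvings (always enough,
-- since m = |n| drops strictly at every iteration); returns the final (t, m)
def pvTrailGo : Nat → Int → Int → Int × Int
  | 0, t, m => (t, m)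
  | fuel + 1, t, m =>
      if PySem.Int.mod m 2 == 1 then pvTrailGo fuel (t + 1) (PySem.Int.floordiv m 2)
      else (t, m)

-- one iteration of Source B's for-loop body (the element appended for n); 2 ** (t - 1) is ported
-- with (t - 1).toNat, exact because t ≥ 1 whenever this branch runs (n is odd, so |n| is odd)
def pvElemB (n : Int) : Int :=
  if PySem.Int.mod n 2 == 0 then n + 1
  else
    let tm := pvTrailGo (n.natAbs + 1) 0 |n|
    if tm.2 == 0 then n + PySem.Int.floordiv (n + 1) 2
    else n + 2 ^ (tm.1 - 1).toNat

def solution_alt (numbers : List Int) : List Int :=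
  numbers.foldl (fun answer n => answer ++ [pvElemB n]) []

-- ===== PRECONDITION & SPEC =====
def Spec_solution (numbers : List Int) (out : List Int) : Prop := out = solution_alt numbers
instance (numbers : List Int) (out : List Int) : Decidable (Spec_solution numbers out) := by
  unfold Spec_solution; infer_instance

-- ===== CLAIM (what is proved, stated in full; the proofs are below) =====
def Claim_equal_solution : Prop := ∀ (numbers : List Int), Dom_solution numbers → Spec_solution numbers (solution numbers)

-- ===== LEMMAS AND PROOFS =====

-- number of trailing 1-bits
def tOnes (m : Nat) : Nat :=
  if h : m % 2 = 1 then tOnes (m / 2) + 1 else 0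
decreasing_by exact Nat.div_lt_self (by omega) (by omega)

lemma tOnes_even {m : Nat} (h : m % 2 = 0) : tOnes m = 0 := by
  rw [tOnes]; simp [h]

lemma tOnes_odd {m : Nat} (h : m % 2 = 1) : tOnes m = tOnes (m / 2) + 1 := by
  rw [tOnes]; simp [h]

lemma rfind0_snoc_zero (xs : List Char) : pvRfind0 (xs ++ ['0']) = (xs.length : Int) := by
  induction xs with
  | nil => simp [pvRfind0]
  | cons c rest ih =>
      simp only [List.cons_append, pvRfind0, ih]
      rw [if_pos (by omega)]
      simp only [List.length_cons]
      push_cast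
      ring

lemma rfind0_snoc_ne (xs : List Char) (c : Char) (hc : c ≠ '0') :
    pvRfind0 (xs ++ [c]) = pvRfind0 xs := by
  induction xs with
  | nil => simp [pvRfind0, hc]
  | cons d rest ih => simp only [List.cons_append, pvRfind0, ih]

lemma rfind0_cons_dash (xs : List Char) :
    pvRfind0 ('-' :: xs) = if pvRfind0 xs ≠ -1 then pvRfind0 xs + 1 else -1 := by
  simp [pvRfind0]

lemma parseBin_aux (k : Nat) (a : Int) :
    List.foldl (fun a c => 2 * a + (if c == '1' then 1 else 0)) a (List.replicate k '0')
      = a * 2 ^ k := by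
  induction k generalizing a with
  | zero => simp
  | succ k ih =>
      rw [List.replicate_succ, List.foldl_cons, ih]
      simp; ring

lemma parseBin_pow (k : Nat) : pvParseBin ('1' :: List.replicate k '0') = 2 ^ k := by
  unfold pvParseBin
  rw [List.foldl_cons, parseBin_aux]
  norm_num

-- the length of the all-ones binary string
lemma bits_len_allones (k : Nat) : (pvBits (2 ^ k - 1)).length = k := by
  induction k with
  | zero => rw [pvBits]; simp
  | succ k ih =>
      have hpow : 2 ^ (k + 1) = 2 * 2 ^ k := by rw [pow_succ]; ring
      have hpos : 0 < 2 ^ k := Nat.two_pow_pos k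
      rw [pvBits, dif_neg (by omega)]
      rw [show (2 ^ (k + 1) - 1) / 2 = 2 ^ k - 1 from by omega]
      simp [ih]

-- key invariant of A's string search: for positive m, either the binary string is all ones
-- (rfind = -1, m = 2^len - 1, all len bits are trailing ones) or rfind points just left of
-- the trailing block of ones (and then m is not all ones)
lemma bits_key (m : Nat) (hm : 0 < m) :
    (pvRfind0 (pvBits m) = -1 ∧ m + 1 = 2 ^ (pvBits m).length ∧ tOnes m = (pvBits m).length)
  ∨ (pvRfind0 (pvBits m) = ((pvBits m).length : Int) - 1 - (tOnes m : Int)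
      ∧ tOnes m < (pvBits m).length ∧ m + 1 ≠ 2 ^ (pvBits m).length) := by
  induction m using Nat.strong_induction_on with
  | _ m ih =>
    rw [pvBits, dif_neg (by omega)]
    by_cases h2 : m % 2 = 1
    · rw [if_pos (by simp [h2])]
      by_cases h1 : m = 1
      · left
        subst h1
        have h0 : pvBits (1 / 2) = [] := by norm_num; rw [pvBits]; simp
        rw [h0]
        refine ⟨by decide, by decide, ?_⟩
        rw [tOnes_odd (by decide)]
        norm_num
        rw [tOnes_even (by decide)]
      · -- m odd, m ≥ 3
        have hmd : 0 < m / 2 := by omega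
        have hrec : m = 2 * (m / 2) + 1 := by omega
        rcases ih (m / 2) (by omega) hmd with ⟨hrf, hpow, ht⟩ | ⟨hrf, ht, hne⟩
        · left
          rw [rfind0_snoc_ne _ _ (by decide), hrf, tOnes_odd h2, ht]
          refine ⟨rfl, ?_, by simp⟩
          rw [List.length_append, List.length_singleton, pow_succ]
          omega
        · right
          rw [rfind0_snoc_ne _ _ (by decide), hrf, tOnes_odd h2]
          refine ⟨?_, ?_, ?_⟩
          · simp [List.length_append]
            omega
          · simp
            omega
          · rw [List.length_append, List.length_singleton, pow_succ]
            intro hcon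
            exact hne (by omega)
    · -- even: last digit '0'
      right
      rw [if_neg (by simp [h2]), rfind0_snoc_zero, tOnes_even (by omega)]
      have hpos : 0 < 2 ^ (pvBits (m / 2)).length := Nat.two_pow_pos _
      refine ⟨?_, by simp, ?_⟩
      · simp [List.length_append]
      · rw [List.length_append, List.length_singleton, pow_succ]
        omega

lemma trailGo_eq (fuel : Nat) : ∀ (m : Nat), m < fuel → ∀ (t : Int),
    pvTrailGo fuel t (m : Int) = (t + (tOnes m : Int), ((m / 2 ^ tOnes m : Nat) : Int)) := by
  induction fuel with
  | zero => omega
  | succ fuel ih =>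
      intro m hlt t
      rw [pvTrailGo]
      have hmod : PySem.Int.mod (m : Int) 2 = ((m % 2 : Nat) : Int) := by
        exact_mod_cast PySem.Int.mod_natCast m 2
      by_cases h2 : m % 2 = 1
      · rw [if_pos (by rw [hmod, h2]; simp)]
        have hdiv : PySem.Int.floordiv (m : Int) 2 = ((m / 2 : Nat) : Int) := by
          exact_mod_cast PySem.Int.floordiv_natCast m 2
        rw [hdiv, ih (m / 2) (by omega), tOnes_odd h2]
        have hdd : m / 2 / 2 ^ tOnes (m / 2) = m / 2 ^ (tOnes (m / 2) + 1) := by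
          rw [Nat.div_div_eq_div_mul, pow_succ]
          ring_nf
        rw [hdd]
        simp only [Prod.mk.injEq]
        exact ⟨by push_cast; ring, trivial⟩
      · rw [if_neg (by rw [hmod]; simp; omega), tOnes_even (by omega)]
        simp

-- the loop leaves m = 0 exactly when the magnitude was all ones
lemma allones_iff (m : Nat) : m / 2 ^ tOnes m = 0 ↔ m + 1 = 2 ^ tOnes m := by
  induction m using Nat.strong_induction_on with
  | _ m ih =>
    by_cases h2 : m % 2 = 1
    · rw [tOnes_odd h2]
      have hdd : m / 2 ^ (tOnes (m / 2) + 1) = m / 2 / 2 ^ tOnes (m / 2) := by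
        rw [Nat.div_div_eq_div_mul, pow_succ]
        ring_nf
      rw [hdd, ih (m / 2) (by omega)]
      have hpow : 2 ^ (tOnes (m / 2) + 1) = 2 * 2 ^ tOnes (m / 2) := by rw [pow_succ]; ring
      omega
    · rw [tOnes_even (by omega)]
      simp only [pow_zero, Nat.div_one]
      omega

lemma floordiv_pow_two (t : Nat) (ht : 0 < t) :
    PySem.Int.floordiv ((2 : Int) ^ t) 2 = 2 ^ (t - 1) := by
  rw [PySem.Int.floordiv_eq_ediv_of_pos (by norm_num)]
  have h : (2 : Int) ^ t = 2 ^ (t - 1) * 2 := by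
    rcases Nat.exists_eq_add_of_le ht with ⟨k, hk⟩
    subst hk
    simp [pow_succ, pow_add]
    ring
  rw [h, Int.mul_ediv_cancel _ (by norm_num)]

lemma elem_eq (n : Int) : pvElemA n = pvElemB n := by
  by_cases hev : (PySem.Int.mod n 2 == 0) = true
  · unfold pvElemA pvElemB
    rw [if_pos hev, if_pos hev]
  · -- n is odd (either sign); work with the magnitude n.natAbs
    have hndvd : ¬ (2 : Int) ∣ n := by
      intro hd
      exact hev (by simpa using hd)
    have h2 : n.natAbs % 2 = 1 := by omega
    have hm : 0 < n.natAbs := by omega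
    have ht1 : 1 ≤ tOnes n.natAbs := by rw [tOnes_odd h2]; omega
    have hTG : pvTrailGo (n.natAbs + 1) 0 ((n.natAbs : Nat) : Int)
        = ((tOnes n.natAbs : Int), ((n.natAbs / 2 ^ tOnes n.natAbs : Nat) : Int)) := by
      rw [trailGo_eq _ _ (by omega)]
      simp
    have h2dvd : (2 : Int) ∣ (n + 1) := by omega
    obtain ⟨c, hc⟩ := h2dvd
    have hfd : PySem.Int.floordiv (n + 1) 2 = c := by
      rw [hc, PySem.Int.floordiv_eq_ediv_of_pos (by norm_num),
          Int.mul_ediv_cancel_left _ (by norm_num)]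
    rcases bits_key n.natAbs hm with ⟨hrf, hpow, htl⟩ | ⟨hrf, htl, hne⟩
    · -- all ones: both take their special branches
      have hsrf : pvRfind0 (pvFormatB n) = -1 := by
        unfold pvFormatB
        rcases lt_trichotomy n 0 with hlt | hz | hgt
        · rw [if_pos hlt, rfind0_cons_dash, hrf]
          simp
        · exact absurd (by rw [hz]; exact dvd_zero 2) hndvd
        · rw [if_neg (show ¬ n < 0 from by omega), if_neg (show ¬ n = 0 from by omega),
              show n.toNat = n.natAbs from by omega, hrf]
      have hmt : n.natAbs + 1 = 2 ^ tOnes n.natAbs := by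
        rw [htl]; exact hpow
      have hall : ((n.natAbs / 2 ^ tOnes n.natAbs : Nat) : Int) = 0 := by
        exact_mod_cast (allones_iff n.natAbs).mpr hmt
      have hA : pvElemA n = n + (n + 1) - PySem.Int.floordiv (n + 1) 2 := by
        simp only [pvElemA]
        rw [if_neg hev, hsrf, if_neg (show ¬ (-1 : Int) ≠ -1 from by simp)]
      have hB : pvElemB n = n + PySem.Int.floordiv (n + 1) 2 := by
        have hsnd : (pvTrailGo (n.natAbs + 1) 0 ((n.natAbs : Nat) : Int)).2
            = ((n.natAbs / 2 ^ tOnes n.natAbs : Nat) : Int) := by rw [hTG]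
        simp only [pvElemB]
        rw [if_neg hev, Int.abs_eq_natAbs, hsnd, hall,
            if_pos (show (((0 : Int)) == 0) = true from by simp)]
      rw [hA, hB, hfd, hc]
      ring
    · -- not all ones: both take their main branches
      have hnall : ¬ ((n.natAbs / 2 ^ tOnes n.natAbs : Nat) : Int) = 0 := by
        -- if the loop ended at 0, the magnitude would be 2^t - 1, whose string has length t
        intro h0
        have h0' : n.natAbs / 2 ^ tOnes n.natAbs = 0 := by exact_mod_cast h0
        have hmt : n.natAbs + 1 = 2 ^ tOnes n.natAbs := (allones_iff n.natAbs).mp h0'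
        have hlen : (pvBits n.natAbs).length = tOnes n.natAbs := by
          conv_lhs => rw [show n.natAbs = 2 ^ tOnes n.natAbs - 1 from by omega]
          exact bits_len_allones _
        exact hne (by rw [hlen]; exact hmt)
      have htlt : ((tOnes n.natAbs : Int)) < ((pvBits n.natAbs).length : Int) := by
        exact_mod_cast htl
      have hA : pvElemA n = n + 2 ^ tOnes n.natAbs - PySem.Int.floordiv (2 ^ tOnes n.natAbs) 2 := by
        simp only [pvElemA]
        rw [if_neg hev]
        unfold pvFormatB
        rcases lt_trichotomy n 0 with hlt | hz | hgt
        · rw [if_pos hlt, rfind0_cons_dash, hrf,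
              if_pos (show ((pvBits n.natAbs).length : Int) - 1 - (tOnes n.natAbs : Int) ≠ -1
                from by omega),
              if_pos (show ((pvBits n.natAbs).length : Int) - 1 - (tOnes n.natAbs : Int) + 1 ≠ -1
                from by omega)]
          rw [show (((('-' :: pvBits n.natAbs).length : Nat) : Int)
                - (((pvBits n.natAbs).length : Int) - 1 - (tOnes n.natAbs : Int) + 1) - 1).toNat
              = tOnes n.natAbs from by simp only [List.length_cons]; omega]
          rw [parseBin_pow]
        · exact absurd (by rw [hz]; exact dvd_zero 2) hndvd
        · rw [if_neg (show ¬ n < 0 from by omega), if_neg (show ¬ n = 0 from by omega),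
              show n.toNat = n.natAbs from by omega, hrf,
              if_pos (show ((pvBits n.natAbs).length : Int) - 1 - (tOnes n.natAbs : Int) ≠ -1
                from by omega)]
          rw [show (((pvBits n.natAbs).length : Int)
                - (((pvBits n.natAbs).length : Int) - 1 - (tOnes n.natAbs : Int)) - 1).toNat
              = tOnes n.natAbs from by omega]
          rw [parseBin_pow]
      have hB : pvElemB n = n + 2 ^ (tOnes n.natAbs - 1) := by
        have hsnd : (pvTrailGo (n.natAbs + 1) 0 ((n.natAbs : Nat) : Int)).2
            = ((n.natAbs / 2 ^ tOnes n.natAbs : Nat) : Int) := by rw [hTG]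
        have hfst : (pvTrailGo (n.natAbs + 1) 0 ((n.natAbs : Nat) : Int)).1
            = ((tOnes n.natAbs : Nat) : Int) := by rw [hTG]
        simp only [pvElemB]
        rw [if_neg hev, Int.abs_eq_natAbs, hsnd, hfst,
            if_neg (show ¬ ((((n.natAbs / 2 ^ tOnes n.natAbs : Nat) : Int)) == 0) = true
              from by simpa using hnall)]
        rw [show ((((tOnes n.natAbs : Nat) : Int)) - 1).toNat = tOnes n.natAbs - 1 from by omega]
      rw [hA, hB, floordiv_pow_two _ ht1]
      rw [show tOnes n.natAbs = (tOnes n.natAbs - 1) + 1 from by omega, pow_succ]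
      simp only [Nat.add_sub_cancel]
      ring

-- ===== VERDICT (by name: the statement is the Claim_ definition above) =====
theorem solution_spec : Claim_equal_solution := by
  intro numbers _
  unfold Spec_solution solution solution_alt
  apply PySem.List.foldl_congr_mem
  intro acc x _
  rw [elem_eq x]
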